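-- pv_equiv track=rewrite | github.com/pypi-data/pypi-mirror-253 | packages/py-xbc/py_xbc-0.1.2-py3-none-any.whl/xbc/__init__.py | longest_key
-- ===== SOURCE A (Python) =====
-- def longest_key(seq):
--     'Find the deepest-nested key in the sequence provided.'
--     lens = [len(x) for x in seq]
--     shortest = min(lens)
--
--     if shortest < 1:
--         return None
--
--     ret = []
--
--     for i in range(shortest):
--         count = {}
--
--         for item in seq:
--             j = item[i]
--
--             if j not in count:
--                 count[j] = 0
--
--             count[j] += 1
--         if len(count.keys()) == 1:
--             ret.append(seq[0][i])
--         else: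
--             return '.'.join(ret)
--     return None
-- ===== SOURCE B (Python) =====
-- def longest_key(seq):
--     'Find the deepest-nested key in the sequence provided.'
--     shortest = min(len(x) for x in seq)
--     if shortest < 1:
--         return None
--     first = seq[0]
--     common = shortest
--     for item in seq:
--         k = 0
--         while k < common and item[k] == first[k]:
--             k += 1
--         common = k
--     if common == shortest:
--         return None
--     return '.'.join(first[:common])
-- ===== Notes on version B (the rewrite author's own statement) =====
-- stated objective: alternative
-- what changed: Replaces A's column-major scan (one count dict built per level, dict-size test, early return) by a row-major scan maintaining a single shrinking common-prefix length against the first item, joining first[:common] at the end; no dicts are built and the per-item walk stops at the current common bound.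
import Mathlib
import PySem

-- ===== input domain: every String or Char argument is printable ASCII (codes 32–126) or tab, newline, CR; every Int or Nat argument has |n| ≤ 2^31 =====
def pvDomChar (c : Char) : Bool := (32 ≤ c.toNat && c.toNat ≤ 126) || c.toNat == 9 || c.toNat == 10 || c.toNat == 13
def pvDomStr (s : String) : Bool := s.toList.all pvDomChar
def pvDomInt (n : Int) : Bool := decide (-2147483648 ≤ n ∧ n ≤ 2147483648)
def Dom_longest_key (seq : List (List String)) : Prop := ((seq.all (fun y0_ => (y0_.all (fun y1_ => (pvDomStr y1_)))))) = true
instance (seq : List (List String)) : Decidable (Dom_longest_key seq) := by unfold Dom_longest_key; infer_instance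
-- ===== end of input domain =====

-- B replaces A's level-major scan with a per-level count dict by an item-major scan
-- maintaining one shrinking common-prefix length (objective: alternative decomposition, no dicts).
-- Both ports agree on every nonempty seq; A raises ValueError on [] (excluded by Pre_).

-- ===== PORT A =====
-- inner 'for item in seq' loop of one level i: count[item[i]] with membership-init then += 1
def lkA_level (seq : List (List String)) (i : Nat) : PySem.Dict String Int :=
  seq.foldl (fun count item =>
    let j := PySem.List.pyGetD item (i : Int) ""   -- item[i]; always in range: i < min of the lengths
    let count := if count.contains j then count else count.insert j 0
    count.modify j 0 (· + 1)) PySem.Dict.empty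

-- the 'for i in range(shortest)' loop with its early return; ret is the accumulator
def lkA_go (seq : List (List String)) (idxs : List Nat) (ret : List String) : Option String :=
  match idxs with
  | [] => none
  | i :: rest =>
    let count := lkA_level seq i
    if count.keys.length = 1 then
      lkA_go seq rest (ret ++ [PySem.List.pyGetD (PySem.List.pyGetD seq 0 []) (i : Int) ""])
    else some (PySem.Str.join "." ret)

def longest_key (seq : List (List String)) : Option String :=
  let lens := seq.map (fun x => (x.length : Int))
  match PySem.List.min? lens (fun x => x) with
  | none => none        -- min([]) raises ValueError; excluded by Pre_
  | some shortest =>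
    if shortest < 1 then none
    else lkA_go seq (List.range shortest.toNat) []

-- ===== PORT B =====
-- the 'while k < common and item[k] == first[k]: k += 1' loop (indices always in range)
def lkB_walk (item first : List String) (common k : Nat) : Nat :=
  if _h : k < common then
    if item.getD k "" = first.getD k "" then lkB_walk item first common (k + 1) else k
  else k
termination_by common - k

def longest_key_alt (seq : List (List String)) : Option String :=
  let lens := seq.map (fun x => (x.length : Int))
  match PySem.List.min? lens (fun x => x) with
  | none => none        -- min of empty generator raises ValueError; excluded by Pre_
  | some shortest =>
    if shortest < 1 then none
    else
      let first := seq.headD []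
      let common := seq.foldl (fun c item => lkB_walk item first c 0) shortest.toNat
      if common = shortest.toNat then none
      else some (PySem.Str.join "." (first.take common))   -- '.'.join(first[:common])

-- ===== PRECONDITION & SPEC =====
-- Pre_ excludes only the empty sequence, on which A's min(lens) raises ValueError.
def Pre_longest_key (seq : List (List String)) : Prop := seq ≠ []
instance (seq : List (List String)) : Decidable (Pre_longest_key seq) := by unfold Pre_longest_key; infer_instance
def pvWitness_longest_key : List (List String) := [["a", "b"], ["a", "c"]]

def Spec_longest_key (seq : List (List String)) (out : Option String) : Prop := out = longest_key_alt seq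
instance (seq : List (List String)) (out : Option String) : Decidable (Spec_longest_key seq out) := by unfold Spec_longest_key; infer_instance

-- ===== CLAIM (what is proved, stated in full; the proofs are below) =====
def Claim_equal_longest_key : Prop := ∀ (seq : List (List String)), Dom_longest_key seq → Pre_longest_key seq → Spec_longest_key seq (longest_key seq)

-- ===== LEMMAS AND PROOFS =====

lemma pv_len_one_iff (xs : List String) (a : String) (ha : a ∈ xs) :
    (PySem.Set.ofList xs).length = 1 ↔ ∀ x ∈ xs, x = a := by
  constructor
  · intro h x hx
    rcases List.length_eq_one_iff.mp h with ⟨b, hb⟩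
    have hx' : x ∈ PySem.Set.ofList xs := (PySem.Set.mem_ofList xs x).mpr hx
    have ha' : a ∈ PySem.Set.ofList xs := (PySem.Set.mem_ofList xs a).mpr ha
    rw [hb] at hx' ha'
    simp at hx' ha'
    rw [hx', ha']
  · intro h
    have hnd : (PySem.Set.ofList xs).Nodup := PySem.Set.nodup_ofList xs
    have hmem : ∀ x ∈ PySem.Set.ofList xs, x = a := by
      intro x hx; exact h x ((PySem.Set.mem_ofList xs x).mp hx)
    have ha' : a ∈ PySem.Set.ofList xs := (PySem.Set.mem_ofList xs a).mpr ha
    match hl : PySem.Set.ofList xs with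
    | [] => rw [hl] at ha'; simp at ha'
    | [b] => rfl
    | b :: c :: t =>
      rw [hl] at hmem hnd
      have hb := hmem b (by simp)
      have hc := hmem c (by simp)
      subst hb; rw [hc] at hnd; simp at hnd

lemma pv_step_keys (d : PySem.Dict String Int) (j : String) :
    (((if d.contains j then d else d.insert j 0).modify j 0 (· + 1))).keys
      = PySem.Set.add d.keys j := by
  by_cases h : d.contains j
  · simp [h, PySem.Dict.keys_modify, PySem.Set.add, PySem.Dict.keys_insert_of_contains,
      (PySem.Dict.contains_iff_mem_keys d j).mp h]
  · have hnm : j ∉ d.keys := fun hm => h ((PySem.Dict.contains_iff_mem_keys d j).mpr hm)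
    simp [h, PySem.Dict.keys_modify, PySem.Set.add, PySem.Dict.keys_insert_of_not_contains,
      PySem.Dict.keys_insert_of_contains, PySem.Dict.contains_insert_self, hnm]

lemma pv_level_keys (seq : List (List String)) (i : Nat) :
    (lkA_level seq i).keys
      = PySem.Set.ofList (seq.map (fun item => PySem.List.pyGetD item (i : Int) "")) := by
  have main : ∀ d : PySem.Dict String Int,
      (seq.foldl (fun count item =>
        let j := PySem.List.pyGetD item (i : Int) ""
        let count := if count.contains j then count else count.insert j 0
        count.modify j 0 (· + 1)) d).keys
      = seq.foldl (fun s item => PySem.Set.add s (PySem.List.pyGetD item (i : Int) "")) d.keys := by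
    induction seq with
    | nil => intro d; rfl
    | cons x xs ih =>
      intro d
      simp only [List.foldl_cons]
      rw [ih, pv_step_keys]
  show (seq.foldl _ PySem.Dict.empty).keys = _
  rw [main]
  simp only [PySem.Dict.keys_empty]
  rw [PySem.Set.ofList_eq_foldl, List.foldl_map]

lemma pv_walk_spec (item first : List String) (c k : Nat) (hk : k ≤ c) :
    k ≤ lkB_walk item first c k ∧ lkB_walk item first c k ≤ c ∧
    (∀ j, k ≤ j → j < lkB_walk item first c k → item.getD j "" = first.getD j "") ∧
    (lkB_walk item first c k < c →
      item.getD (lkB_walk item first c k) "" ≠ first.getD (lkB_walk item first c k) "") := by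
  suffices H : ∀ fuel k, k ≤ c → c - k ≤ fuel →
      k ≤ lkB_walk item first c k ∧ lkB_walk item first c k ≤ c ∧
      (∀ j, k ≤ j → j < lkB_walk item first c k → item.getD j "" = first.getD j "") ∧
      (lkB_walk item first c k < c →
        item.getD (lkB_walk item first c k) "" ≠ first.getD (lkB_walk item first c k) "") by
    exact H (c - k) k hk le_rfl
  intro fuel
  induction fuel with
  | zero =>
    intro k hk hf
    have hkc : k = c := by omega
    rw [lkB_walk]
    simp [hkc]
    omega
  | succ m ih =>
    intro k hk hf
    rw [lkB_walk]
    split_ifs with h1 h2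
    · obtain ⟨A, B, C, D⟩ := ih (k + 1) (by omega) (by omega)
      refine ⟨by omega, B, ?_, D⟩
      intro j hj1 hj2
      rcases Nat.eq_or_lt_of_le hj1 with rfl | hlt
      · exact h2
      · exact C j hlt hj2
    · exact ⟨le_rfl, hk, by omega, fun _ => h2⟩
    · have hkc : k = c := by omega
      exact ⟨le_rfl, hk, by omega, by omega⟩

lemma pv_fold_spec (first : List String) (l : List (List String)) (c : Nat) :
    l.foldl (fun c item => lkB_walk item first c 0) c ≤ c ∧
    (∀ item ∈ l, ∀ j < l.foldl (fun c item => lkB_walk item first c 0) c,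
        item.getD j "" = first.getD j "") ∧
    (l.foldl (fun c item => lkB_walk item first c 0) c < c →
      ∃ item ∈ l, item.getD (l.foldl (fun c item => lkB_walk item first c 0) c) ""
        ≠ first.getD (l.foldl (fun c item => lkB_walk item first c 0) c) "") := by
  induction l generalizing c with
  | nil => simp
  | cons x xs ih =>
    simp only [List.foldl_cons]
    obtain ⟨W1, W2, W3, W4⟩ := pv_walk_spec x first c 0 (Nat.zero_le c)
    obtain ⟨I1, I2, I3⟩ := ih (lkB_walk x first c 0)
    refine ⟨le_trans I1 W2, ?_, ?_⟩
    · intro item hm j hj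
      rcases List.mem_cons.mp hm with rfl | hm'
      · exact W3 j (Nat.zero_le j) (lt_of_lt_of_le hj I1)
      · exact I2 item hm' j hj
    · intro hlt
      by_cases hcase : xs.foldl (fun c item => lkB_walk item first c 0) (lkB_walk x first c 0)
          < lkB_walk x first c 0
      · obtain ⟨item, hm, hne⟩ := I3 hcase
        exact ⟨item, List.mem_cons_of_mem x hm, hne⟩
      · have heq : xs.foldl (fun c item => lkB_walk item first c 0) (lkB_walk x first c 0)
            = lkB_walk x first c 0 := le_antisymm I1 (by omega)
        refine ⟨x, List.mem_cons_self, ?_⟩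
        rw [heq]
        exact W4 (by omega)

lemma pv_take_eq (l : List String) (r : Nat) (hr : r ≤ l.length) :
    (List.range r).map (fun j => l.getD j "") = l.take r := by
  apply List.ext_getElem
  · simp [hr]
  · intro i h1 h2
    simp only [List.getElem_map, List.getElem_range, List.getElem_take]
    have hi : i < l.length := by simp at h2; omega
    simp [List.getD_eq_getElem?_getD, List.getElem?_eq_getElem hi]

lemma pv_go_eq (h : List String) (t : List (List String)) (n r : Nat)
    (hrn : r ≤ n)
    (hagree : ∀ j < r, ∀ item ∈ h :: t, item.getD j "" = h.getD j "")
    (hbad : r < n → ∃ item ∈ h :: t, item.getD r "" ≠ h.getD r "")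
    (i : Nat) (hi : i ≤ r) :
    lkA_go (h :: t) (List.range' i (n - i)) ((List.range i).map (fun j => h.getD j ""))
      = (if r = n then none
         else some (PySem.Str.join "." ((List.range r).map (fun j => h.getD j "")))) := by
  have hkeys : ∀ i : Nat, ((lkA_level (h :: t) i).keys.length = 1
      ↔ ∀ item ∈ h :: t, item.getD i "" = h.getD i "") := by
    intro i
    rw [pv_level_keys, pv_len_one_iff _ (PySem.List.pyGetD h (i : Int) "") (by simp)]
    simp [PySem.List.pyGetD_natCast]
  suffices H : ∀ fuel i, i ≤ r → n - i ≤ fuel →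
      lkA_go (h :: t) (List.range' i (n - i)) ((List.range i).map (fun j => h.getD j ""))
        = (if r = n then none
           else some (PySem.Str.join "." ((List.range r).map (fun j => h.getD j "")))) by
    exact H (n - i) i hi le_rfl
  intro fuel
  induction fuel with
  | zero =>
    intro i hir hf
    have h1 : i = n := by omega
    have h2 : r = n := by omega
    simp [h1, h2, lkA_go]
  | succ m ih =>
    intro i hir hf
    by_cases hin : i = n
    · have h2 : r = n := by omega
      simp [hin, h2, lkA_go]
    · have hlt : i < n := by omega
      have hstep : n - i = (n - (i + 1)) + 1 := by omega
      rw [hstep, List.range'_succ, lkA_go]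
      by_cases hcase : i < r
      · have hag := fun item hm => hagree i hcase item hm
        rw [if_pos ((hkeys i).mpr hag)]
        have hret : ((List.range i).map (fun j => h.getD j ""))
            ++ [PySem.List.pyGetD (PySem.List.pyGetD (h :: t) (0 : Int) []) (i : Int) ""]
            = (List.range (i + 1)).map (fun j => h.getD j "") := by
          simp [List.range_succ, PySem.List.pyGetD_natCast, PySem.List.pyGetD_zero_cons]
        rw [hret]
        exact ih (i + 1) hcase (by omega)
      · have hieq : i = r := by omega
        obtain ⟨it, hm, hne⟩ := hbad (by omega)
        have hnag : ¬ ∀ item ∈ h :: t, item.getD i "" = h.getD i "" := by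
          rw [hieq]; intro hall; exact hne (hall it hm)
        rw [if_neg (fun hl => hnag ((hkeys i).mp hl)), hieq, if_neg (by omega : ¬ r = n)]

-- ===== VERDICT (by name: the statement is the Claim_ definition above) =====
theorem longest_key_spec : Claim_equal_longest_key := by
  intro seq _hdom hpre
  unfold Spec_longest_key
  cases seq with
  | nil => exact absurd rfl hpre
  | cons h t =>
    obtain ⟨m, hm⟩ : ∃ m, PySem.List.min? ((h :: t).map (fun x => (x.length : Int)))
        (fun x => x) = some m := by
      cases hmin : PySem.List.min? ((h :: t).map (fun x => (x.length : Int))) (fun x => x) with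
      | none => exact absurd ((PySem.List.min?_eq_none_iff _ _).mp hmin) (by simp)
      | some m => exact ⟨m, rfl⟩
    have hm0 : 0 ≤ m := by
      have := PySem.List.min?_mem hm
      simp at this
      rcases this with h1 | ⟨x, _, hx⟩ <;> omega
    have hmh : m ≤ (h.length : Int) := PySem.List.min?_isMin hm _ (by simp)
    simp only [longest_key, longest_key_alt, hm]
    by_cases hm1 : m < 1
    · simp [hm1]
    · simp only [if_neg hm1, List.headD_cons]
      obtain ⟨F1, F2, F3⟩ := pv_fold_spec h (h :: t) m.toNat
      have hgo := pv_go_eq h t m.toNat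
        ((h :: t).foldl (fun c item => lkB_walk item h c 0) m.toNat)
        F1 (fun j hj item hmem => F2 item hmem j hj) F3 0 (Nat.zero_le _)
      simp only [Nat.sub_zero, List.range_zero, List.map_nil,
        ← List.range_eq_range'] at hgo
      rw [hgo]
      by_cases hr : (h :: t).foldl (fun c item => lkB_walk item h c 0) m.toNat = m.toNat
      · simp [hr]
      · rw [if_neg hr, if_neg hr]
        have hrlen : (h :: t).foldl (fun c item => lkB_walk item h c 0) m.toNat ≤ h.length := by
          have : m.toNat ≤ h.length := by omega
          omega
        rw [pv_take_eq h _ hrlen]
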